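-- pv_equiv track=rewrite | github.com/puruneko/fx_automation | Lib/myfx/myplt.py | time2number_in_index
-- ===== SOURCE A (Python) =====
-- def time2number_in_index(time,specIndex):
--     num = [0]*len(time)
--     i = j = 0
--     while(i < len(specIndex)):
--         if j >= len(time):
--             break
--         if specIndex[i] == time[j]:
--             num[j] = i
--             j += 1
--             i -= 1
--         i += 1
--     return num
-- ===== SOURCE B (Python) =====
-- def time2number_in_index(time, specIndex):
--     # index each value of specIndex by its occurrence positions, then walk time
--     # once with a resume pointer lo (inclusive, so equal consecutive values share
--     # one index); stop at the first value with no position >= lo, leaving zeros.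
--     pos = {}
--     for i, v in enumerate(specIndex):
--         pos.setdefault(v, []).append(i)
--     num = [0] * len(time)
--     lo = 0
--     for j, t in enumerate(time):
--         p = next((q for q in pos.get(t, []) if q >= lo), None)
--         if p is None:
--             break
--         num[j] = p
--         lo = p
--     return num
-- ===== Notes on version B (the rewrite author's own statement) =====
-- stated objective: alternative
-- what changed: Replaces A's single-cursor rescan of specIndex (a while loop juggling i/j with i-=1/i+=1) by building a value-to-occurrence-positions index of specIndex once, then a single pass over time that picks each value's first position >= a resume pointer.
import Mathlib
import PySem

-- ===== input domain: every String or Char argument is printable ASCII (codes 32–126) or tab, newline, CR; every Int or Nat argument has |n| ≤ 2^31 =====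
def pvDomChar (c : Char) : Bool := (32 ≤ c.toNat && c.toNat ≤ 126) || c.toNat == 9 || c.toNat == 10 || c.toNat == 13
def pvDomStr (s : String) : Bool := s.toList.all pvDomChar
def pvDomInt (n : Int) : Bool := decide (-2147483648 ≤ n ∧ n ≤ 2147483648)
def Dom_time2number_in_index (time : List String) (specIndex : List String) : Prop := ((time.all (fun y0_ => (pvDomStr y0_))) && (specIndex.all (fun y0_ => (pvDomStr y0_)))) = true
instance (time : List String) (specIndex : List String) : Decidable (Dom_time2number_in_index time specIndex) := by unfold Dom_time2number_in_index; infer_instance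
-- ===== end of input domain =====

-- B replaces A's single cursor scan of specIndex by a positions-per-value index
-- consulted with a resume pointer (objective: alternative decomposition, same result).

-- ===== PORT A =====
-- the while loop: i scans specIndex, j scans time; on a match num[j] := i and
-- (i -= 1; i += 1) keeps i in place while j advances; loop ends when either runs out
def time2number_in_index_loopA (specIndex time : List String) (num : List Int)
    (i j : Nat) : List Int :=
  if _h : i < specIndex.length then
    if time.length ≤ j then num
    else
      if specIndex.getD i "" == time.getD j "" then
        time2number_in_index_loopA specIndex time (num.set j (i : Int)) i (j + 1)
      else
        time2number_in_index_loopA specIndex time num (i + 1) j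
  else num
termination_by (specIndex.length - i) + (time.length - j)
decreasing_by all_goals omega

def time2number_in_index (time : List String) (specIndex : List String) : List Int :=
  time2number_in_index_loopA specIndex time (List.replicate time.length 0) 0 0

-- ===== PORT B =====
-- pos = {}; for i, v in enumerate(specIndex): pos.setdefault(v, []).append(i)
def time2number_in_index_buildPos (specIndex : List String) : PySem.Dict String (List Int) :=
  (PySem.List.enumerate specIndex 0).foldl
    (fun d iv => d.insert iv.2 (d.getD iv.2 [] ++ [iv.1])) PySem.Dict.empty

-- the for loop over time with resume pointer lo; break leaves the zero tail of num
def time2number_in_index_loopB (pos : PySem.Dict String (List Int))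
    (ts : List String) (lo : Int) : List Int :=
  match ts with
  | [] => []
  | t :: rest =>
    match (pos.getD t []).find? (fun q => lo ≤ q) with
    | none => List.replicate (rest.length + 1) 0
    | some p => p :: time2number_in_index_loopB pos rest p

def time2number_in_index_alt (time : List String) (specIndex : List String) : List Int :=
  time2number_in_index_loopB (time2number_in_index_buildPos specIndex) time 0

-- ===== PRECONDITION & SPEC =====
def Spec_time2number_in_index (time : List String) (specIndex : List String) (out : List Int) : Prop := out = time2number_in_index_alt time specIndex
instance (time : List String) (specIndex : List String) (out : List Int) : Decidable (Spec_time2number_in_index time specIndex out) := by unfold Spec_time2number_in_index; infer_instance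

-- ===== CLAIM (what is proved, stated in full; the proofs are below) =====
def Claim_equal_time2number_in_index : Prop := ∀ (time : List String) (specIndex : List String), Dom_time2number_in_index time specIndex → Spec_time2number_in_index time specIndex (time2number_in_index time specIndex)

-- ===== LEMMAS AND PROOFS =====

-- occurrence positions of t in spec, offset by s (Nat-valued model of pos[t])
def pvOcc (spec : List String) (s : Nat) (t : String) : List Nat :=
  match spec with
  | [] => []
  | x :: xs => (if x == t then [s] else []) ++ pvOcc xs (s + 1) t

theorem pvOcc_mem_iff (spec : List String) (s : Nat) (t : String) (q : Nat) :
    q ∈ pvOcc spec s t ↔ s ≤ q ∧ q < s + spec.length ∧ spec.getD (q - s) "" == t := by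
  induction spec generalizing s with
  | nil => simp [pvOcc]; intros; omega
  | cons x xs ih =>
    simp only [pvOcc, List.mem_append]
    constructor
    · rintro (h | h)
      · have hx : x == t := by by_contra hne; simp [hne] at h
        have : q = s := by
          by_cases hb : x == t
          · simpa [hb] using h
          · simp [hb] at h
        subst this
        simpa [List.getD] using hx
      · have := (ih (s + 1)).1 h
        obtain ⟨h1, h2, h3⟩ := this
        refine ⟨by omega, by simp; omega, ?_⟩
        have hq : q - s = (q - (s + 1)) + 1 := by omega
        rw [hq]
        simpa using h3
    · rintro ⟨h1, h2, h3⟩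
      by_cases hqs : q = s
      · subst hqs
        simp at h3
        left; simp [h3]
      · right
        apply (ih (s + 1)).2
        refine ⟨by omega, by simp at h2 ⊢; omega, ?_⟩
        have hq : q - s = (q - (s + 1)) + 1 := by omega
        rw [hq] at h3
        simpa using h3
  
theorem pvOcc_pairwise (spec : List String) (s : Nat) (t : String) :
    (pvOcc spec s t).Pairwise (· < ·) := by
  induction spec generalizing s with
  | nil => simp [pvOcc]
  | cons x xs ih =>
    simp only [pvOcc]
    by_cases hx : x == t
    · simp only [hx, if_pos, List.singleton_append]
      refine List.pairwise_cons.2 ⟨?_, ih (s + 1)⟩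
      intro q hq
      have := (pvOcc_mem_iff xs (s + 1) t q).1 hq
      omega
    · simpa [hx] using ih (s + 1)

-- find? on a sorted member list returns the member itself
theorem pv_find_sorted_mem {l : List Nat} (hp : l.Pairwise (· < ·)) {i : Nat}
    (hm : i ∈ l) : l.find? (fun q => decide (i ≤ q)) = some i := by
  induction l with
  | nil => simp at hm
  | cons a l ih =>
    rcases List.mem_cons.1 hm with rfl | hm'
    · simp [List.find?]
    · have ha : a < i := (List.pairwise_cons.1 hp).1 i hm'
      have hd : decide (i ≤ a) = false := decide_eq_false (by omega)
      simp only [List.find?, hd]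
      exact ih (List.pairwise_cons.1 hp).2 hm'

theorem pv_find_congr {α : Type} (l : List α) (p q : α → Bool)
    (h : ∀ x ∈ l, p x = q x) : l.find? p = l.find? q := by
  induction l with
  | nil => rfl
  | cons a l ih =>
    simp only [List.find?]
    rw [h a (List.mem_cons_self ..)]
    cases hq : q a
    · exact ih (fun x hx => h x (List.mem_cons_of_mem _ hx))
    · rfl

-- F1: past the end of spec nothing matches
theorem pv_find_occ_none (spec : List String) (t : String) (i : Nat)
    (h : spec.length ≤ i) :
    (pvOcc spec 0 t).find? (fun q => decide (i ≤ q)) = none := by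
  apply List.find?_eq_none.2
  intro q hq
  have := (pvOcc_mem_iff spec 0 t q).1 hq
  simp only [decide_eq_true_eq]
  omega

-- F2: spec[i] == t, so the first position ≥ i is i itself
theorem pv_find_occ_hit (spec : List String) (t : String) (i : Nat)
    (hlt : i < spec.length) (ht : spec.getD i "" == t) :
    (pvOcc spec 0 t).find? (fun q => decide (i ≤ q)) = some i := by
  apply pv_find_sorted_mem (pvOcc_pairwise spec 0 t)
  exact (pvOcc_mem_iff spec 0 t i).2 ⟨Nat.zero_le _, by omega, by simpa using ht⟩

-- F3: spec[i] ≠ t, so searching from i and from i+1 agree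
theorem pv_find_occ_miss (spec : List String) (t : String) (i : Nat)
    (ht : ¬ (spec.getD i "" == t)) :
    (pvOcc spec 0 t).find? (fun q => decide (i ≤ q)) =
      (pvOcc spec 0 t).find? (fun q => decide (i + 1 ≤ q)) := by
  apply pv_find_congr
  intro q hq
  have hmem := (pvOcc_mem_iff spec 0 t q).1 hq
  have : q ≠ i := by
    rintro rfl
    exact ht (by simpa using hmem.2.2)
  simp only [decide_eq_decide]
  omega

-- the built dict's entry for t is exactly pvOcc, cast to Int
theorem pv_buildPos_foldl (spec : List String) (s : Nat)
    (d : PySem.Dict String (List Int)) (t : String) :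
    ((PySem.List.enumerate spec (s : Int)).foldl
        (fun d iv => d.insert iv.2 (d.getD iv.2 [] ++ [iv.1])) d).getD t []
      = d.getD t [] ++ (pvOcc spec s t).map Int.ofNat := by
  induction spec generalizing s d with
  | nil => simp [PySem.List.enumerate_nil, pvOcc]
  | cons x xs ih =>
    rw [PySem.List.enumerate_cons, List.foldl_cons]
    have : ((s : Int) + 1) = ((s + 1 : Nat) : Int) := by push_cast; ring
    rw [this, ih]
    by_cases hx : x = t
    · subst hx
      rw [PySem.Dict.getD_insert]
      simp [pvOcc]
    · rw [PySem.Dict.getD_insert]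
      simp [pvOcc, hx, Ne.symm hx]

theorem pv_buildPos_getD (spec : List String) (t : String) :
    (time2number_in_index_buildPos spec).getD t []
      = (pvOcc spec 0 t).map Int.ofNat := by
  have h := pv_buildPos_foldl spec 0 PySem.Dict.empty t
  simpa [time2number_in_index_buildPos] using h

-- loopB's search over the Int-valued dict entry, in Nat terms
theorem pv_loopB_find (spec : List String) (t : String) (i : Nat) :
    ((time2number_in_index_buildPos spec).getD t []).find? (fun q => decide ((i : Int) ≤ q))
      = ((pvOcc spec 0 t).find? (fun q => decide (i ≤ q))).map Int.ofNat := by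
  rw [pv_buildPos_getD, List.find?_map]
  apply congrArg
  apply pv_find_congr
  intro q _
  simp [Function.comp]

-- the main simulation: A's loop from state (i, j) produces the already-written
-- prefix of num followed by B's loop on the remaining time values resumed at i
theorem pv_main (spec time : List String) :
    ∀ (n i j : Nat) (num : List Int),
      n = (spec.length - i) + (time.length - j) →
      num.length = time.length → j ≤ time.length →
      num.drop j = List.replicate (time.length - j) 0 →
      time2number_in_index_loopA spec time num i j
        = num.take j ++
            time2number_in_index_loopB (time2number_in_index_buildPos spec)
              (time.drop j) (i : Int) := by
  intro n
  induction n using Nat.strong_induction_on with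
  | _ n ih =>
    intro i j num hn hlen hj hdrop
    rw [time2number_in_index_loopA]
    by_cases hi : i < spec.length
    · rw [dif_pos hi]
      by_cases hjt : time.length ≤ j
      · rw [if_pos hjt]
        have hjeq : j = time.length := le_antisymm hj hjt
        subst hjeq
        simp [time2number_in_index_loopB, List.take_of_length_le (le_of_eq hlen),
          List.drop_length]
      · rw [if_neg hjt]
        have hjlt : j < time.length := by omega
        set t := time.getD j "" with ht
        have hdropj : time.drop j = t :: time.drop (j + 1) := by
          rw [ht, List.getD, List.drop_eq_getElem_cons hjlt]
          simp [List.getElem?_eq_getElem hjlt]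
        by_cases hmatch : spec.getD i "" == t
        · rw [if_pos hmatch]
          have hdrop' : (num.set j (i : Int)).drop (j + 1)
              = List.replicate (time.length - (j + 1)) 0 := by
            rw [List.drop_set, if_pos (by omega : j < j + 1)]
            have h1 : num.drop (j + 1) = List.drop 1 (num.drop j) := by
              rw [List.drop_drop]
            have h2 : time.length - j - 1 = time.length - (j + 1) := by omega
            rw [h1, hdrop, List.drop_replicate, h2]
          have htake : (num.set j (i : Int)).take (j + 1)
              = num.take j ++ [(i : Int)] := by
            rw [List.take_add_one, List.getElem?_set_self (by omega),
              List.take_set_of_le (by omega)]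
            rfl
          have hrec := ih ((spec.length - i) + (time.length - (j + 1)))
            (by omega) i (j + 1) (num.set j (i : Int)) rfl
            (by simpa using hlen) (by omega) hdrop'
          rw [hrec, htake, hdropj]
          simp only [time2number_in_index_loopB]
          rw [pv_loopB_find, pv_find_occ_hit spec t i hi hmatch]
          simp [List.append_assoc]
        · rw [if_neg hmatch]
          have hrec := ih ((spec.length - (i + 1)) + (time.length - j))
            (by omega) (i + 1) j num rfl hlen hj hdrop
          rw [hrec, hdropj]
          simp only [time2number_in_index_loopB]
          rw [pv_loopB_find, pv_loopB_find, pv_find_occ_miss spec t i hmatch]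
    · rw [dif_neg hi]
      have hocc : ∀ t', ((time2number_in_index_buildPos spec).getD t' []).find?
          (fun q => decide ((i : Int) ≤ q)) = none := by
        intro t'
        rw [pv_loopB_find, pv_find_occ_none spec t' i (by omega)]
        rfl
      cases hdt : time.drop j with
      | nil =>
        have : j = time.length := by
          have := List.length_drop (l := time) (i := j)
          rw [hdt] at this; simp at this; omega
        simp [time2number_in_index_loopB,
          List.take_of_length_le (by omega : num.length ≤ j)]
      | cons t rest =>
        rw [time2number_in_index_loopB, hocc t]
        have hlenr : rest.length + 1 = time.length - j := by
          have := List.length_drop (l := time) (i := j)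
          rw [hdt] at this; simp at this; omega
        rw [hlenr, ← hdrop, List.take_append_drop]

-- ===== VERDICT (by name: the statement is the Claim_ definition above) =====
theorem time2number_in_index_spec : Claim_equal_time2number_in_index := by
  intro time specIndex _
  unfold Spec_time2number_in_index time2number_in_index time2number_in_index_alt
  have h := pv_main specIndex time
    ((specIndex.length - 0) + (time.length - 0)) 0 0
    (List.replicate time.length 0) rfl (by simp) (by omega) (by simp)
  simpa using h
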